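-- pv_equiv track=rewrite | github.com/hojoungjang/programming-exercises | 1802-종이-접기/solution.py | solution
-- ===== SOURCE A (Python) =====
-- def solution(folds):
--
--     def _solution(lo, hi):
--         if lo > hi:
--             return True
--
--         mid = (lo + hi) // 2
--
--         if not _solution(lo, mid - 1) or not _solution(mid + 1, hi):
--             return False
--
--         i = mid - 1
--         j = mid + 1
--         while i >= lo and j <= hi:
--             if folds[i] == folds[j]:
--                 return False
--             i -= 1
--             j += 1
--         return True
--
--     return _solution(0, len(folds)-1)
-- ===== SOURCE B (Python) =====
-- def solution(folds):
--     stack = [(0, len(folds) - 1)]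
--     while stack:
--         lo, hi = stack.pop()
--         if lo > hi:
--             continue
--         mid = (lo + hi) // 2
--         if any(x == y for x, y in zip(reversed(folds[lo:mid]), folds[mid + 1:hi + 1])):
--             return False
--         stack.append((lo, mid - 1))
--         stack.append((mid + 1, hi))
--     return True
-- ===== Notes on version B (the rewrite author's own statement) =====
-- stated objective: alternative
-- what changed: Replaces A's nested recursive divide-and-conquer with an iterative explicit stack of (lo,hi) intervals, and replaces the index-stepping inner while loop with a zip of the reversed left slice against the right slice checked by any().
import Mathlib
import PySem

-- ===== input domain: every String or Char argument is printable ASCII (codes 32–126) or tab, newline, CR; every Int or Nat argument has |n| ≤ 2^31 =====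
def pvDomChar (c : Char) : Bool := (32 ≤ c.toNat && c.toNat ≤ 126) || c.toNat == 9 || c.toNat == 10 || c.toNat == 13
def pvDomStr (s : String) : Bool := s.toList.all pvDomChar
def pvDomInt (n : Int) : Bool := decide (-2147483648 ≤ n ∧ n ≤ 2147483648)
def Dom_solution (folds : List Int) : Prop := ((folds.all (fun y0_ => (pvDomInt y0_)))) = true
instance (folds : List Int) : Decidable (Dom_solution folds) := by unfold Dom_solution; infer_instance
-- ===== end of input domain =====

-- B replaces A's recursion by an explicit stack of (lo, hi) intervals and does each
-- node's symmetric check by zipping the reversed left slice with the right slice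
-- (objective: alternative decomposition, same asymptotic cost).
-- Both ports use a Nat fuel argument only to make the recursion structural; the fuel
-- given at the call sites is always sufficient, so neither base case is ever reached.

-- ===== PORT A =====
-- the inner while loop of _solution: i descending, j ascending (fuel ≥ iterations)
def innerA (folds : List Int) (lo hi : Int) : Nat → Int → Int → Bool
  | 0, _, _ => true
  | fuel + 1, i, j =>
    if lo ≤ i ∧ j ≤ hi then
      if PySem.List.pyGetD folds i 0 == PySem.List.pyGetD folds j 0 then false
      else innerA folds lo hi fuel (i - 1) (j + 1)
    else true

-- _solution(lo, hi); fuel bounds the recursion depth (interval size shrinks each level)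
def solutionRec (folds : List Int) : Nat → Int → Int → Bool
  | 0, _, _ => true
  | fuel + 1, lo, hi =>
    if lo > hi then true
    else
      let mid := PySem.Int.floordiv (lo + hi) 2
      if !(solutionRec folds fuel lo (mid - 1)) || !(solutionRec folds fuel (mid + 1) hi) then
        false
      else innerA folds lo hi (hi - lo + 2).toNat (mid - 1) (mid + 1)

def solution (folds : List Int) : Bool :=
  solutionRec folds (folds.length + 1) 0 ((folds.length : Int) - 1)

-- ===== PORT B =====
-- the while loop over the explicit stack (head = top; fuel ≥ number of iterations)
def altLoop (folds : List Int) : Nat → List (Int × Int) → Bool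
  | _, [] => true
  | 0, _ :: _ => true
  | fuel + 1, (lo, hi) :: rest =>
    if lo > hi then altLoop folds fuel rest
    else
      let mid := PySem.Int.floordiv (lo + hi) 2
      if ((PySem.List.slice folds (some lo) (some mid)).reverse.zip
            (PySem.List.slice folds (some (mid + 1)) (some (hi + 1)))).any
           (fun p => p.1 == p.2) then false
      else altLoop folds fuel ((mid + 1, hi) :: (lo, mid - 1) :: rest)

def solution_alt (folds : List Int) : Bool :=
  altLoop folds (2 * folds.length + 1) [(0, (folds.length : Int) - 1)]

-- ===== PRECONDITION & SPEC =====
def Spec_solution (folds : List Int) (out : Bool) : Prop := out = solution_alt folds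
instance (folds : List Int) (out : Bool) : Decidable (Spec_solution folds out) := by unfold Spec_solution; infer_instance

-- ===== CLAIM (what is proved, stated in full; the proofs are below) =====
def Claim_equal_solution : Prop := ∀ (folds : List Int), Dom_solution folds → Spec_solution folds (solution folds)

-- ===== LEMMAS AND PROOFS =====

lemma innerA_succ (folds : List Int) (lo hi : Int) (fuel : Nat) (i j : Int) :
    innerA folds lo hi (fuel + 1) i j =
      if lo ≤ i ∧ j ≤ hi then
        if PySem.List.pyGetD folds i 0 == PySem.List.pyGetD folds j 0 then false
        else innerA folds lo hi fuel (i - 1) (j + 1)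
      else true := rfl

lemma solutionRec_succ (folds : List Int) (fuel : Nat) (lo hi : Int) :
    solutionRec folds (fuel + 1) lo hi =
      if lo > hi then true
      else
        let mid := PySem.Int.floordiv (lo + hi) 2
        if !(solutionRec folds fuel lo (mid - 1)) || !(solutionRec folds fuel (mid + 1) hi) then
          false
        else innerA folds lo hi (hi - lo + 2).toNat (mid - 1) (mid + 1) := rfl

lemma altLoop_nil (folds : List Int) (fuel : Nat) : altLoop folds fuel [] = true := by
  cases fuel <;> rfl

lemma altLoop_succ_cons (folds : List Int) (fuel : Nat) (lo hi : Int) (rest : List (Int × Int)) :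
    altLoop folds (fuel + 1) ((lo, hi) :: rest) =
      if lo > hi then altLoop folds fuel rest
      else
        let mid := PySem.Int.floordiv (lo + hi) 2
        if ((PySem.List.slice folds (some lo) (some mid)).reverse.zip
              (PySem.List.slice folds (some (mid + 1)) (some (hi + 1)))).any
             (fun p => p.1 == p.2) then false
        else altLoop folds fuel ((mid + 1, hi) :: (lo, mid - 1) :: rest) := rfl

-- the loop does Σ (2·size + 1) iterations over the intervals currently on the stack
def pvWeight (stack : List (Int × Int)) : Nat :=
  (stack.map (fun p => 2 * (p.2 - p.1 + 1).toNat + 1)).sum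

-- with sufficient fuel the result does not depend on the fuel
lemma solRec_fuel (folds : List Int) :
    ∀ (f : Nat) (lo hi : Int), (hi - lo + 2).toNat ≤ f →
    solutionRec folds f lo hi = solutionRec folds (hi - lo + 2).toNat lo hi := by
  intro f
  induction f using Nat.strong_induction_on with
  | _ f ih =>
    intro lo hi hf
    match f with
    | 0 =>
      have h0 : (hi - lo + 2).toNat = 0 := by omega
      rw [h0]
    | (f' + 1) =>
      by_cases hgt : lo > hi
      · rcases hc : (hi - lo + 2).toNat with _ | c
        · rw [solutionRec_succ, if_pos hgt]; rfl
        · rw [solutionRec_succ, if_pos hgt, solutionRec_succ, if_pos hgt]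
      · obtain ⟨c, hc⟩ : ∃ c, (hi - lo + 2).toNat = c + 1 :=
          ⟨(hi - lo + 2).toNat - 1, by omega⟩
        have hb := PySem.Int.floordiv_two_mid_bounds (lo := lo) (hi := hi) (by omega)
        rw [hc, solutionRec_succ, solutionRec_succ, if_neg hgt, if_neg hgt]
        simp only
        rw [ih f' (by omega) lo (PySem.Int.floordiv (lo + hi) 2 - 1) (by omega),
            ih f' (by omega) (PySem.Int.floordiv (lo + hi) 2 + 1) hi (by omega),
            ih c (by omega) lo (PySem.Int.floordiv (lo + hi) 2 - 1) (by omega),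
            ih c (by omega) (PySem.Int.floordiv (lo + hi) 2 + 1) hi (by omega)]

-- A's inner while loop computes the complement of B's "any equal symmetric pair" zip check
lemma inner_eq (folds : List Int) (lo hi mid : Int)
    (h0 : 0 ≤ lo) (h1 : lo ≤ mid) (h2 : mid ≤ hi) (h3 : hi < (folds.length : Int))
    (h4 : mid - lo ≤ hi - mid) :
    ∀ (fuel t : Nat), (mid - lo).toNat ≤ t + fuel →
    innerA folds lo hi fuel (mid - 1 - (t : Int)) (mid + 1 + (t : Int)) =
      !((((PySem.List.slice folds (some lo) (some mid)).reverse.zip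
           (PySem.List.slice folds (some (mid + 1)) (some (hi + 1)))).drop t).any
          (fun p => p.1 == p.2)) := by
  have hL := PySem.List.slice_toNat folds (a := lo) (b := mid) h0 (by omega)
  have hR := PySem.List.slice_toNat folds (a := mid + 1) (b := hi + 1) (by omega) (by omega)
  have hLlen : (PySem.List.slice folds (some lo) (some mid)).length = (mid - lo).toNat := by
    rw [hL]; simp only [List.length_take, List.length_drop]; omega
  have hRlen : (PySem.List.slice folds (some (mid + 1)) (some (hi + 1))).length
      = (hi - mid).toNat := by
    rw [hR]; simp only [List.length_take, List.length_drop]; omega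
  intro fuel
  induction fuel with
  | zero =>
    intro t ht
    rw [show innerA folds lo hi 0 (mid - 1 - (t : Int)) (mid + 1 + (t : Int)) = true from rfl]
    rw [List.drop_eq_nil_of_le (by
      rw [List.length_zip, List.length_reverse, hLlen, hRlen]; omega)]
    simp
  | succ k ih =>
    intro t ht
    by_cases htb : (mid - lo).toNat ≤ t
    · rw [innerA_succ, if_neg (by rintro ⟨c1, c2⟩; omega)]
      rw [List.drop_eq_nil_of_le (by
        rw [List.length_zip, List.length_reverse, hLlen, hRlen]; omega)]
      simp
    · rw [innerA_succ, if_pos ⟨by omega, by omega⟩]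
      have hzt : t < ((PySem.List.slice folds (some lo) (some mid)).reverse.zip
          (PySem.List.slice folds (some (mid + 1)) (some (hi + 1)))).length := by
        rw [List.length_zip, List.length_reverse, hLlen, hRlen]; omega
      rw [List.drop_eq_getElem_cons hzt, List.any_cons, List.getElem_zip]
      have hLt : t < (PySem.List.slice folds (some lo) (some mid)).reverse.length := by
        rw [List.length_reverse, hLlen]; omega
      have hRt : t < (PySem.List.slice folds (some (mid + 1)) (some (hi + 1))).length := by
        rw [hRlen]; omega
      have hfi : mid.toNat - 1 - t < folds.length := by omega
      have hfj : mid.toNat + 1 + t < folds.length := by omega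
      have e1 : (PySem.List.slice folds (some lo) (some mid)).reverse[t]?
          = folds[mid.toNat - 1 - t]? := by
        rw [List.getElem?_reverse (by rw [hLlen]; omega), hLlen]
        conv_lhs => rw [hL]
        rw [List.getElem?_take, if_pos (by omega), List.getElem?_drop]
        congr 1
        omega
      have hgi : (PySem.List.slice folds (some lo) (some mid)).reverse[t]'hLt
          = folds[mid.toNat - 1 - t]'hfi :=
        Option.some.inj ((List.getElem?_eq_getElem hLt).symm.trans
          (e1.trans (List.getElem?_eq_getElem hfi)))
      have e2 : (PySem.List.slice folds (some (mid + 1)) (some (hi + 1)))[t]?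
          = folds[mid.toNat + 1 + t]? := by
        conv_lhs => rw [hR]
        rw [List.getElem?_take, if_pos (by omega), List.getElem?_drop]
        congr 1
        omega
      have hgj : (PySem.List.slice folds (some (mid + 1)) (some (hi + 1)))[t]'hRt
          = folds[mid.toNat + 1 + t]'hfj :=
        Option.some.inj ((List.getElem?_eq_getElem hRt).symm.trans
          (e2.trans (List.getElem?_eq_getElem hfj)))
      have hpi : PySem.List.pyGetD folds (mid - 1 - (t : Int)) 0 = folds[mid.toNat - 1 - t]'hfi := by
        rw [PySem.List.pyGetD_eq_getElem folds 0 (by omega) (by omega)]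
        simp only [show (mid - 1 - (t : Int)).toNat = mid.toNat - 1 - t from by omega]
      have hpj : PySem.List.pyGetD folds (mid + 1 + (t : Int)) 0 = folds[mid.toNat + 1 + t]'hfj := by
        rw [PySem.List.pyGetD_eq_getElem folds 0 (by omega) (by omega)]
        simp only [show (mid + 1 + (t : Int)).toNat = mid.toNat + 1 + t from by omega]
      rw [hpi, hpj, hgi, hgj]
      cases hbe : (folds[mid.toNat - 1 - t]'hfi == folds[mid.toNat + 1 + t]'hfj) with
      | true => simp
      | false =>
        simp only [Bool.false_or, if_neg Bool.false_ne_true]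
        have harg1 : mid - 1 - (t : Int) - 1 = mid - 1 - ((t + 1 : Nat) : Int) := by
          push_cast; ring
        have harg2 : mid + 1 + (t : Int) + 1 = mid + 1 + ((t + 1 : Nat) : Int) := by
          push_cast; ring
        rw [harg1, harg2]
        exact ih (t + 1) (by omega)

-- the stack loop computes the conjunction of A's recursion over every interval on the stack
lemma altLoop_eq (folds : List Int) : ∀ (fuel : Nat) (stack : List (Int × Int)),
    pvWeight stack ≤ fuel → (∀ p ∈ stack, 0 ≤ p.1 ∧ p.2 < (folds.length : Int)) →
    altLoop folds fuel stack
      = stack.all (fun p => solutionRec folds (p.2 - p.1 + 2).toNat p.1 p.2) := by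
  intro fuel
  induction fuel with
  | zero =>
    intro stack hw _
    match stack with
    | [] => simp [altLoop_nil]
    | (lo, hi) :: rest =>
      exfalso
      simp only [pvWeight, List.map_cons, List.sum_cons] at hw
      omega
  | succ k ih =>
    intro stack hw hinv
    match stack with
    | [] => simp [altLoop_nil]
    | (lo, hi) :: rest =>
      have hrest : ∀ p ∈ rest, 0 ≤ p.1 ∧ p.2 < (folds.length : Int) := by
        intro p hp; exact hinv p (List.mem_cons_of_mem _ hp)
      have hthis := hinv (lo, hi) (List.mem_cons_self)
      rw [altLoop_succ_cons]
      by_cases hgt : lo > hi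
      · rw [if_pos hgt, ih rest (by
          simp only [pvWeight, List.map_cons, List.sum_cons] at hw ⊢
          omega) hrest]
        have hnode : solutionRec folds (hi - lo + 2).toNat lo hi = true := by
          rcases hc : (hi - lo + 2).toNat with _ | c
          · rfl
          · rw [solutionRec_succ, if_pos hgt]
        simp [hnode]
      · rw [if_neg hgt]
        have hb := PySem.Int.floordiv_two_mid_bounds (lo := lo) (hi := hi) (by omega)
        set mid := PySem.Int.floordiv (lo + hi) 2 with hmid
        have hmidle : mid - lo ≤ hi - mid := by
          have hm := PySem.Int.floordiv_mul_add_mod (lo + hi) 2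
          have hm0 := PySem.Int.mod_nonneg (lo + hi) (b := 2) (by norm_num)
          have hm1 := PySem.Int.mod_lt (lo + hi) (b := 2) (by norm_num)
          rw [← hmid] at hm
          omega
        have hinner := inner_eq folds lo hi mid (by omega) (by omega) (by omega)
          (by omega) hmidle (hi - lo + 2).toNat 0 (by omega)
        simp only [Nat.cast_zero, sub_zero, add_zero, List.drop_zero] at hinner
        obtain ⟨c, hc⟩ : ∃ c, (hi - lo + 2).toNat = c + 1 :=
          ⟨(hi - lo + 2).toNat - 1, by omega⟩
        have hnode : solutionRec folds (hi - lo + 2).toNat lo hi =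
            ((solutionRec folds (mid - 1 - lo + 2).toNat lo (mid - 1) &&
              solutionRec folds (hi - (mid + 1) + 2).toNat (mid + 1) hi) &&
              !((((PySem.List.slice folds (some lo) (some mid)).reverse.zip
                   (PySem.List.slice folds (some (mid + 1)) (some (hi + 1)))).any
                  (fun p => p.1 == p.2)))) := by
          rw [hc, solutionRec_succ, if_neg hgt]
          simp only [← hmid]
          rw [solRec_fuel folds c lo (mid - 1) (by omega),
              solRec_fuel folds c (mid + 1) hi (by omega), hinner]
          cases hLv : solutionRec folds (mid - 1 - lo + 2).toNat lo (mid - 1) <;>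
            cases hRv : solutionRec folds (hi - (mid + 1) + 2).toNat (mid + 1) hi <;>
              simp
        by_cases hany : (((PySem.List.slice folds (some lo) (some mid)).reverse.zip
            (PySem.List.slice folds (some (mid + 1)) (some (hi + 1)))).any
            (fun p => p.1 == p.2)) = true
        · rw [if_pos hany]
          rw [hany] at hnode
          simp only [List.all_cons]
          rw [hnode]
          simp
        · rw [if_neg hany]
          rw [eq_false_of_ne_true hany] at hnode
          have hw' : pvWeight ((mid + 1, hi) :: (lo, mid - 1) :: rest) ≤ k := by
            simp only [pvWeight, List.map_cons, List.sum_cons] at hw ⊢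
            omega
          rw [ih _ hw' (by
            intro p hp
            rcases List.mem_cons.1 hp with h | hp
            · subst h; constructor <;> simp <;> omega
            rcases List.mem_cons.1 hp with h | hp
            · subst h; constructor <;> simp <;> omega
            · exact hrest p hp)]
          simp only [List.all_cons]
          rw [hnode]
          cases hLv : solutionRec folds (mid - 1 - lo + 2).toNat lo (mid - 1) <;>
            cases hRv : solutionRec folds (hi - (mid + 1) + 2).toNat (mid + 1) hi <;> simp

-- ===== VERDICT (by name: the statement is the Claim_ definition above) =====
theorem solution_spec : Claim_equal_solution := by
  intro folds _
  unfold Spec_solution solution solution_alt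
  rw [altLoop_eq folds (2 * folds.length + 1) [(0, (folds.length : Int) - 1)]
      (by simp [pvWeight])
      (by intro p hp
          simp only [List.mem_singleton] at hp
          subst hp
          refine ⟨le_refl 0, ?_⟩
          show (folds.length : Int) - 1 < (folds.length : Int)
          omega)]
  simp only [List.all_cons, List.all_nil, Bool.and_true]
  rw [solRec_fuel folds (folds.length + 1) 0 ((folds.length : Int) - 1) (by omega)]
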